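-- pv_equiv track=rewrite | github.com/ljdursi/rosalind_chapel | problems/PDPL/pdpl.py | infer_set_from_diff_multiset
-- ===== SOURCE A (Python) =====
-- def infer_set_from_diff_multiset(dmultiset):
--     values = [0, dmultiset[-1]]
--     diffs = dmultiset[:-1]
--
--     def update_diffs_with_new_value(alldiffs, vals, newval):
--         newdiffs = [abs(v - newval) for v in vals]
--         alldiffs_copy = alldiffs[:]
--         for diff in newdiffs:
--             try:
--                 alldiffs_copy.remove(diff)
--             except:
--                 return None
--         return alldiffs_copy
--
--     def solve(values, diffs):
--         if diffs is None:
--             return None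
--
--         if len(diffs) == 0:
--             return values
--
--         nextdiff = diffs[-1]
--         leftval = values[-1] - nextdiff
--         rightval = values[0] + nextdiff
--
--         leftdiffs = update_diffs_with_new_value(diffs, values, leftval)
--         leftvals = solve(sorted(values + [leftval]), leftdiffs)
--         if leftvals is not None:
--             return leftvals
--
--         rightdiffs = update_diffs_with_new_value(diffs, values, rightval)
--         rightvals = solve(sorted(values + [rightval]), rightdiffs)
--         if rightvals is not None:
--             return rightvals
--
--         return None
--
--     return solve(values, diffs)
-- ===== SOURCE B (Python) =====
-- def infer_set_from_diff_multiset(dmultiset):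
--     def update_diffs_with_new_value(alldiffs, vals, newval):
--         newdiffs = [abs(v - newval) for v in vals]
--         alldiffs_copy = alldiffs[:]
--         for diff in newdiffs:
--             try:
--                 alldiffs_copy.remove(diff)
--             except ValueError:
--                 return None
--         return alldiffs_copy
--
--     stack = [([0, dmultiset[-1]], dmultiset[:-1])]
--     while stack:
--         values, diffs = stack.pop()
--         if not diffs:
--             return values
--         nextdiff = diffs[-1]
--         # push the right branch first, the left branch last, so the
--         # left branch is explored first (same DFS order as recursion)
--         for newval in (values[0] + nextdiff, values[-1] - nextdiff):
--             reduced = update_diffs_with_new_value(diffs, values, newval)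
--             if reduced is not None:
--                 stack.append((sorted(values + [newval]), reduced))
--     return None
-- ===== Notes on version B (the rewrite author's own statement) =====
-- stated objective: alternative
-- what changed: Replaces the recursive backtracking (nested solve with early returns) by an iterative DFS with an explicit stack of (values, diffs) states, pushing the right branch before the left so the first solution found is identical.
import Mathlib
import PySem

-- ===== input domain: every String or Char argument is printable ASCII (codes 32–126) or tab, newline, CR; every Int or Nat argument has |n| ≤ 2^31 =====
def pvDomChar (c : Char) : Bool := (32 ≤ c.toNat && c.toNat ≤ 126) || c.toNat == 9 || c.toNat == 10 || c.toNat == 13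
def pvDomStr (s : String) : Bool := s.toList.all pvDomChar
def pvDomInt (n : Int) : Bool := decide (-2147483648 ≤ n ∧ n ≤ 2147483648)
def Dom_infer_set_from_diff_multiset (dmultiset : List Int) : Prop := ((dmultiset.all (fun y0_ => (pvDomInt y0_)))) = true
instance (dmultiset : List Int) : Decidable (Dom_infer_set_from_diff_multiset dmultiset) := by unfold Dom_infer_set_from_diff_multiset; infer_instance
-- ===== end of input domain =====

-- B replaces A's recursive backtracking by an iterative DFS over an explicit stack of
-- (values, diffs) states (right branch pushed below the left), same first-found answer.

-- ===== PORT A =====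
-- helper update_diffs_with_new_value (shared verbatim by both Pythons):
-- the for-loop removing each new |v - newval| from a copy of alldiffs, None on failure
def pvRemoveAll (acc : List Int) : List Int → Option (List Int)
  | [] => some acc
  | x :: xs =>
    match PySem.List.remove? acc x with
    | none => none
    | some acc' => pvRemoveAll acc' xs

def pvUpdateDiffs (alldiffs : List Int) (vals : List Int) (newval : Int) : Option (List Int) :=
  pvRemoveAll alldiffs (vals.map (fun v => |v - newval|))

-- termination facts for the ports (cited in decreasing_by)
theorem pvRemoveAll_length : ∀ (ds acc r : List Int), pvRemoveAll acc ds = some r → r.length + ds.length = acc.length := by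
  intro ds
  induction ds with
  | nil => intro acc r h; simp [pvRemoveAll] at h; simp [h]
  | cons x xs ih =>
    intro acc r h
    simp only [pvRemoveAll] at h
    cases hrm : PySem.List.remove? acc x with
    | none => rw [hrm] at h; exact absurd h (by simp)
    | some acc' =>
      rw [hrm] at h
      have hmem : x ∈ acc := by
        by_contra hmem
        rw [(PySem.List.remove?_eq_none_iff acc x).2 hmem] at hrm; exact absurd hrm (by simp)
      have : acc' = acc.erase x := by
        rw [PySem.List.remove?_eq_some_erase acc x hmem] at hrm
        exact (Option.some.inj hrm).symm
      have hlen : acc'.length + 1 = acc.length := by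
        rw [this, List.length_erase_of_mem hmem]
        have : 1 ≤ acc.length := List.length_pos_of_mem hmem
        omega
      have := ih acc' r h
      simp only [List.length_cons]; omega

theorem pvUpdateDiffs_length (alldiffs vals : List Int) (newval : Int) (r : List Int)
    (h : pvUpdateDiffs alldiffs vals newval = some r) : r.length + vals.length = alldiffs.length := by
  have := pvRemoveAll_length (vals.map (fun v => |v - newval|)) alldiffs r h
  simpa using this

-- the inner recursive solve(values, diffs); diffs = none is Python's "diffs is None" case;
-- values[-1] / values[0] are getLast / head of the (always nonempty) values list
def solveA (values : List Int) : Option (List Int) → Option (List Int)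
  | none => none
  | some diffs =>
    if hD : diffs = [] then some values
    else
      match PySem.List.pyGet? diffs (-1) with
      | none => none   -- unreachable (diffs ≠ []); totality guard
      | some nextdiff =>
        match values with
        | [] => none   -- unreachable (values is never empty; Python would raise IndexError here)
        | v0 :: vs =>
          match solveA (PySem.List.sorted ((v0 :: vs) ++ [(v0 :: vs).getLast (by simp) - nextdiff]) (fun x => x) false)
                  (pvUpdateDiffs diffs (v0 :: vs) ((v0 :: vs).getLast (by simp) - nextdiff)) with
          | some r => some r
          | none =>
            solveA (PySem.List.sorted ((v0 :: vs) ++ [v0 + nextdiff]) (fun x => x) false)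
              (pvUpdateDiffs diffs (v0 :: vs) (v0 + nextdiff))
  termination_by o => match o with | none => 0 | some l => l.length + 1
  decreasing_by
  all_goals
    split
    · omega
    · rename_i ld heq
      have := pvUpdateDiffs_length _ _ _ _ heq
      simp only [List.length_cons] at this
      omega

def infer_set_from_diff_multiset (dmultiset : List Int) : Option (List Int) :=
  match PySem.List.pyGet? dmultiset (-1) with
  | none => none   -- IndexError on []: excluded by Pre_
  | some last => solveA [0, last] (some (PySem.List.slice dmultiset none (some (-1))))

-- ===== PORT B =====
-- one child state of the stack loop: [] when the diff removal fails, else the reduced state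
def pvChild (diffs values : List Int) (newval : Int) : List (List Int × List Int) :=
  match pvUpdateDiffs diffs values newval with
  | none => []
  | some reduced => [(PySem.List.sorted (values ++ [newval]) (fun x => x) false, reduced)]

theorem pvChild_sum (diffs values : List Int) (newval : Int) (hv : values ≠ []) :
    ((pvChild diffs values newval).map (fun s => 3 ^ s.2.length)).sum ≤ 3 ^ (diffs.length - 1) := by
  unfold pvChild
  cases hu : pvUpdateDiffs diffs values newval with
  | none => simp
  | some reduced =>
    have := pvUpdateDiffs_length _ _ _ _ hu
    have : 1 ≤ values.length := List.length_pos_of_ne_nil hv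
    simp only [List.map_cons, List.map_nil, List.sum_cons, List.sum_nil, Nat.add_zero]
    exact Nat.pow_le_pow_right (by omega) (by omega)

-- the while-stack loop; the stack top is the list head (left child pushed on top of right)
def loopB : List (List Int × List Int) → Option (List Int)
  | [] => none
  | (values, diffs) :: rest =>
    if hD : diffs = [] then some values
    else
      match PySem.List.pyGet? diffs (-1) with
      | none => loopB rest   -- unreachable (diffs ≠ []); totality guard
      | some nextdiff =>
        match values with
        | [] => loopB rest   -- unreachable (the stack never holds an empty values list); totality guard
        | v0 :: vs =>
          loopB (pvChild diffs (v0 :: vs) ((v0 :: vs).getLast (by simp) - nextdiff) ++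
                 pvChild diffs (v0 :: vs) (v0 + nextdiff) ++ rest)
  termination_by st => (st.map (fun s => 3 ^ s.2.length)).sum
  decreasing_by
  all_goals first
  | (have hp : 0 < 3 ^ diffs.length := Nat.pow_pos (by omega)
     simp only [List.map_cons, List.sum_cons]; omega)
  | (have hv : (v0 :: vs) ≠ ([] : List Int) := by simp
     have hd1 : 1 ≤ diffs.length := List.length_pos_of_ne_nil hD
     have hpow : 3 ^ (diffs.length - 1) + 3 ^ (diffs.length - 1) < 3 ^ diffs.length := by
       have h3 : 3 ^ diffs.length = 3 ^ (diffs.length - 1) * 3 := by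
         rw [← pow_succ]; congr 1; omega
       have hp : 0 < 3 ^ (diffs.length - 1) := Nat.pow_pos (by omega)
       omega
     simp only [List.map_append, List.sum_append, List.map_cons, List.sum_cons]
     refine lt_of_le_of_lt
       (Nat.add_le_add
         (Nat.add_le_add (pvChild_sum diffs (v0 :: vs) _ hv) (pvChild_sum diffs (v0 :: vs) _ hv))
         (le_refl _)) ?_
     omega)

def infer_set_from_diff_multiset_alt (dmultiset : List Int) : Option (List Int) :=
  match PySem.List.pyGet? dmultiset (-1) with
  | none => none   -- IndexError on []: excluded by Pre_
  | some last => loopB [([0, last], PySem.List.slice dmultiset none (some (-1)))]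

-- ===== PRECONDITION & SPEC =====
-- A (and B) raises IndexError on the empty list (dmultiset[-1]); nothing else raises.
def Pre_infer_set_from_diff_multiset (dmultiset : List Int) : Prop := dmultiset ≠ []
instance (dmultiset : List Int) : Decidable (Pre_infer_set_from_diff_multiset dmultiset) := by unfold Pre_infer_set_from_diff_multiset; infer_instance
def pvWitness_infer_set_from_diff_multiset : List Int := [3]

def Spec_infer_set_from_diff_multiset (dmultiset : List Int) (out : Option (List Int)) : Prop := out = infer_set_from_diff_multiset_alt dmultiset
instance (dmultiset : List Int) (out : Option (List Int)) : Decidable (Spec_infer_set_from_diff_multiset dmultiset out) := by unfold Spec_infer_set_from_diff_multiset; infer_instance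

-- ===== CLAIM (what is proved, stated in full; the proofs are below) =====
def Claim_equal_infer_set_from_diff_multiset : Prop := ∀ (dmultiset : List Int), Dom_infer_set_from_diff_multiset dmultiset → Pre_infer_set_from_diff_multiset dmultiset → Spec_infer_set_from_diff_multiset dmultiset (infer_set_from_diff_multiset dmultiset)

-- ===== LEMMAS AND PROOFS =====

-- the first solution among the stack's states, in order (what the DFS stack computes)
def firstSolve : List (List Int × List Int) → Option (List Int)
  | [] => none
  | s :: rest =>
    match solveA s.1 (some s.2) with
    | some r => some r
    | none => firstSolve rest

theorem firstSolve_child (diffs values : List Int) (newval : Int) (rest : List (List Int × List Int)) :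
    firstSolve (pvChild diffs values newval ++ rest) =
      match solveA (PySem.List.sorted (values ++ [newval]) (fun x => x) false) (pvUpdateDiffs diffs values newval) with
      | some r => some r
      | none => firstSolve rest := by
  unfold pvChild
  cases hu : pvUpdateDiffs diffs values newval with
  | none => simp [solveA]
  | some reduced => simp [firstSolve]

theorem loopB_eq_firstSolve : ∀ (st : List (List Int × List Int)), loopB st = firstSolve st := by
  intro st
  induction st using loopB.induct with
  | case1 => simp [loopB, firstSolve]
  | case2 values rest =>
    simp [loopB, firstSolve, solveA]
  | case3 values diffs rest hD hn ih =>
    rw [PySem.List.pyGet?_neg_one] at hn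
    exact absurd (List.getLast?_eq_none_iff.1 hn) hD
  | case4 diffs rest hD nextdiff hn ih =>
    rw [loopB]
    simp only [dif_neg hD, hn]
    rw [ih, firstSolve]
    simp only [solveA, dif_neg hD, hn]
  | case5 diffs rest hD nextdiff hn v0 vs ih =>
    rw [loopB]
    simp only [dif_neg hD, hn]
    rw [ih, List.append_assoc, firstSolve_child, firstSolve_child]
    rw [firstSolve]
    simp only [solveA, dif_neg hD, hn]
    cases solveA (PySem.List.sorted ((v0 :: vs) ++ [(v0 :: vs).getLast (by simp) - nextdiff]) (fun x => x) false)
        (pvUpdateDiffs diffs (v0 :: vs) ((v0 :: vs).getLast (by simp) - nextdiff)) with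
    | some r => rfl
    | none =>
      cases solveA (PySem.List.sorted ((v0 :: vs) ++ [v0 + nextdiff]) (fun x => x) false)
          (pvUpdateDiffs diffs (v0 :: vs) (v0 + nextdiff)) <;> rfl

-- ===== VERDICT (by name: the statement is the Claim_ definition above) =====
theorem infer_set_from_diff_multiset_spec : Claim_equal_infer_set_from_diff_multiset := by
  intro dmultiset _ _
  unfold Spec_infer_set_from_diff_multiset
  unfold infer_set_from_diff_multiset infer_set_from_diff_multiset_alt
  cases h : PySem.List.pyGet? dmultiset (-1) with
  | none => rfl
  | some last =>
    show solveA [0, last] (some (PySem.List.slice dmultiset none (some (-1)))) =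
      loopB [([0, last], PySem.List.slice dmultiset none (some (-1)))]
    rw [loopB_eq_firstSolve, firstSolve]
    cases solveA [0, last] (some (PySem.List.slice dmultiset none (some (-1)))) <;> rfl
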